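-- pv_equiv track=rewrite | github.com/mlg208/python_DZ | 04.07 dz/1.py | extract_emails
-- ===== SOURCE A (Python) =====
-- def extract_emails(text):
--     emails = []
--     i = 0
--     while i < len(text):
--         if text[i] == "@":
--             start = i - 1
--             while start >= 0 and (text[start].isalnum() or text[start] in "-._"):
--                 start -= 1
--             start += 1
--
--             end = i + 1
--             while end < len(text) and (text[end].isalnum() or text[end] in "-._"):
--                 end += 1
--
--             #VN: очень неплохой алгоритм. У него есть небольшой недостаток, например
--             # something@ , @something или просто @  -- будут считаться валидными адресами email.
--             # Также он будет считать адресом something@something, хотя в нём нет точки с именем домена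
--
--             emails.append(text[start:end])
--             i = end
--         else:
--             i += 1
--     return emails
-- ===== SOURCE B (Python) =====
-- def extract_emails(text):
--     # Single forward pass: keep the current word-run and at most one pending
--     # left part; emit a pending email when its right run closes.
--     def word(c):
--         return c.isalnum() or c in "-._"
--     out = []
--     run = ""       # current maximal run of word characters
--     pending = None # left part of an email awaiting its right run
--     for c in text:
--         if c == "@":
--             if pending is not None:
--                 out.append(pending + "@" + run)
--             pending, run = run, ""
--         elif word(c):
--             run += c
--         else:
--             if pending is not None:
--                 out.append(pending + "@" + run)
--             pending, run = None, ""
--     if pending is not None: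
--         out.append(pending + "@" + run)
--     return out
-- ===== Notes on version B (the rewrite author's own statement) =====
-- stated objective: alternative
-- what changed: Replaces A's index-driven loop with backward and forward rescans around each '@' by a single forward fold that maintains the current word run and a pending left part, emitting each email when its right run closes.
import Mathlib
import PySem

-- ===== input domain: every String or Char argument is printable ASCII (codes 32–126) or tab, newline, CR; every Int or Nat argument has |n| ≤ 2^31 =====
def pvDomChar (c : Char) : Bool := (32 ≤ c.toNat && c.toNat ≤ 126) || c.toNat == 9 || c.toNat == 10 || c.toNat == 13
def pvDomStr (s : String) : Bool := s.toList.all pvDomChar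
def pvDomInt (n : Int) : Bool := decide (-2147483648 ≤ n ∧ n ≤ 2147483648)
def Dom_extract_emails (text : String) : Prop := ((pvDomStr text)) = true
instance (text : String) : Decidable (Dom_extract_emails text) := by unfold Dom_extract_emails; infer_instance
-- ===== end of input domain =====

-- B replaces A's index loop with backward/forward rescans by one forward fold that
-- maintains the current word run and a pending left part (objective: alternative, same cost).

-- shared character predicate: c.isalnum() or c in "-._"
def pvWord (c : Char) : Bool := PySem.Chars.isalnum c || c == '-' || c == '.' || c == '_'

-- ===== PORT A =====
-- inner `while start >= 0 and (text[start].isalnum() or text[start] in "-._"): start -= 1`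
def pvBack (t : List Char) (start : Int) : Int :=
  if h : 0 ≤ start ∧ (PySem.List.pyGet? t start).elim false pvWord = true then
    pvBack t (start - 1)
  else start
  termination_by (start + 1).toNat
  decreasing_by have := h.1; omega

-- inner `while end < len(text) and (text[end].isalnum() or text[end] in "-._"): end += 1`
def pvFwd (t : List Char) (e : Int) : Int :=
  if h : e < (t.length : Int) ∧ (PySem.List.pyGet? t e).elim false pvWord = true then
    pvFwd t (e + 1)
  else e
  termination_by ((t.length : Int) - e).toNat
  decreasing_by have := h.1; omega

-- needed by pvMain's decreasing_by
theorem pvFwd_ge (t : List Char) (e : Int) : e ≤ pvFwd t e := by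
  unfold pvFwd
  split
  · have := pvFwd_ge t (e + 1); omega
  · omega
  termination_by ((t.length : Int) - e).toNat
  decreasing_by rename_i h; have := h.1; omega

-- outer while loop of A
def pvMain (t : List Char) (emails : List (List Char)) (i : Int) : List (List Char) :=
  if hi : i < (t.length : Int) then
    if (PySem.List.pyGet? t i).elim false (fun c => c == '@') = true then
      let start := pvBack t (i - 1) + 1
      let e := pvFwd t (i + 1)
      pvMain t (emails ++ [PySem.List.slice t (some start) (some e)]) e
    else pvMain t emails (i + 1)
  else emails
  termination_by ((t.length : Int) - i).toNat
  decreasing_by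
  · have := pvFwd_ge t (i + 1); omega
  · omega

def extract_emails (text : String) : List String :=
  (pvMain text.toList [] 0).map String.ofList

-- ===== PORT B =====
-- emit the pending email (if any): out.append(pending + "@" + run)
def pvFlush (out : List (List Char)) (run : List Char) (pending : Option (List Char)) :
    List (List Char) :=
  match pending with
  | some l => out ++ [l ++ '@' :: run]
  | none => out

-- one step of B's fold over the characters
def pvStep (s : List (List Char) × List Char × Option (List Char)) (c : Char) :
    List (List Char) × List Char × Option (List Char) :=
  let (out, run, pending) := s
  if c == '@' then (pvFlush out run pending, [], some run)
  else if pvWord c then (out, run ++ [c], pending)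
  else (pvFlush out run pending, [], none)

def extract_emails_alt (text : String) : List String :=
  match text.toList.foldl pvStep ([], [], none) with
  | (out, run, pending) => (pvFlush out run pending).map String.ofList

-- ===== PRECONDITION & SPEC =====
def Spec_extract_emails (text : String) (out : List String) : Prop := out = extract_emails_alt text
instance (text : String) (out : List String) : Decidable (Spec_extract_emails text out) := by unfold Spec_extract_emails; infer_instance

-- ===== CLAIM (what is proved, stated in full; the proofs are below) =====
def Claim_equal_extract_emails : Prop := ∀ (text : String), Dom_extract_emails text → Spec_extract_emails text (extract_emails text)

-- ===== LEMMAS AND PROOFS =====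

-- the common characterisation: emails emitted by a scan of u whose current left word run is `left`
def pvSpec (left : List Char) (u : List Char) : List (List Char) :=
  match u with
  | [] => []
  | c :: rest =>
    if c = '@' then
      (left ++ '@' :: rest.takeWhile pvWord) :: pvSpec (rest.takeWhile pvWord) (rest.dropWhile pvWord)
    else if pvWord c then pvSpec (left ++ [c]) rest
    else pvSpec [] rest
  termination_by u.length
  decreasing_by
  · have := List.length_dropWhile_le (p := pvWord) (l := rest); simp; omega
  · simp
  · simp

-- the maximal run of word characters ending just before position i
def lrun (t : List Char) (i : Nat) : List Char :=
  ((t.take i).reverse.takeWhile pvWord).reverse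

theorem lrun_zero (t : List Char) : lrun t 0 = [] := by simp [lrun]

theorem lrun_succ_word (t : List Char) (i : Nat) (h : i < t.length) (hw : pvWord t[i] = true) :
    lrun t (i + 1) = lrun t i ++ [t[i]] := by
  unfold lrun
  rw [List.take_succ_eq_append_getElem h, List.reverse_append]
  simp [List.takeWhile_cons_of_pos, hw]

theorem lrun_succ_not (t : List Char) (i : Nat) (h : i < t.length) (hw : ¬ pvWord t[i] = true) :
    lrun t (i + 1) = [] := by
  unfold lrun
  rw [List.take_succ_eq_append_getElem h, List.reverse_append]
  simp [List.takeWhile_cons_of_neg, hw]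

theorem lrun_length_le (t : List Char) (i : Nat) : (lrun t i).length ≤ min i t.length := by
  have := (List.takeWhile_prefix (l := (t.take i).reverse) pvWord).length_le
  simpa [lrun] using this

-- the prefix of take i t that the backward scan skips
theorem take_eq_skip_append_lrun (t : List Char) (i : Nat) :
    t.take i = ((t.take i).reverse.dropWhile pvWord).reverse ++ lrun t i := by
  unfold lrun
  conv_lhs => rw [← List.reverse_reverse (t.take i),
    ← List.takeWhile_append_dropWhile (p := pvWord) (l := (t.take i).reverse)]
  rw [List.reverse_append]

theorem pvBack_eq (t : List Char) (i : Nat) (hi : i ≤ t.length) :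
    pvBack t ((i : Int) - 1) = (i : Int) - (lrun t i).length - 1 := by
  induction i with
  | zero =>
    rw [pvBack]
    rw [dif_neg (by simp)]
    simp [lrun_zero]
  | succ n ih =>
    have hn : n < t.length := by omega
    have hget : PySem.List.pyGet? t (n : Int) = some t[n] := by
      simp [PySem.List.pyGet?_natCast, List.getElem?_eq_getElem hn]
    rw [show (((n + 1 : Nat) : Int)) - 1 = (n : Int) by push_cast; ring]
    rw [pvBack]
    by_cases hw : pvWord t[n] = true
    · rw [dif_pos ⟨by omega, by rw [hget]; simpa using hw⟩]
      rw [ih (by omega), lrun_succ_word t n hn hw]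
      simp only [List.length_append, List.length_cons, List.length_nil]
      push_cast
      ring
    · rw [dif_neg (fun hc => hw (by rw [hget] at hc; simpa using hc.2))]
      rw [lrun_succ_not t n hn hw]
      simp

theorem pvFwd_eq (t : List Char) (j : Nat) :
    pvFwd t (j : Int) = ((j + ((t.drop j).takeWhile pvWord).length : Nat) : Int) := by
  by_cases hj : j < t.length
  · have hget : PySem.List.pyGet? t (j : Int) = some t[j] := by
      simp [PySem.List.pyGet?_natCast, List.getElem?_eq_getElem hj]
    have hdrop : t.drop j = t[j] :: t.drop (j + 1) := List.drop_eq_getElem_cons hj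
    rw [pvFwd]
    by_cases hw : pvWord t[j] = true
    · rw [dif_pos ⟨by exact_mod_cast hj, by rw [hget]; simpa using hw⟩]
      rw [show ((j : Int) + 1) = (((j + 1 : Nat)) : Int) by push_cast; ring]
      rw [pvFwd_eq t (j + 1)]
      rw [hdrop, List.takeWhile_cons_of_pos hw]
      simp only [List.length_cons]
      push_cast
      ring
    · rw [dif_neg (fun hc => hw (by rw [hget] at hc; simpa using hc.2))]
      rw [hdrop, List.takeWhile_cons_of_neg hw]
      simp
  · rw [pvFwd]
    rw [dif_neg (by intro hc; have := hc.1; omega)]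
    rw [List.drop_eq_nil_of_le (by omega)]
    simp
  termination_by t.length - j
  decreasing_by omega

theorem pvWord_at : pvWord '@' = false := by decide

theorem pvMain_eq (t : List Char) (i : Nat) (emails : List (List Char)) :
    pvMain t emails (i : Int) = emails ++ pvSpec (lrun t i) (t.drop i) := by
  by_cases hlt : i < t.length
  · have hget : PySem.List.pyGet? t (i : Int) = some t[i] := by
      simp [PySem.List.pyGet?_natCast, List.getElem?_eq_getElem hlt]
    have hdrop : t.drop i = t[i] :: t.drop (i + 1) := List.drop_eq_getElem_cons hlt
    rw [pvMain]
    rw [dif_pos (by exact_mod_cast hlt)]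
    by_cases hat : t[i] = '@'
    · rw [if_pos (by rw [hget]; simpa using hat)]
      set L := lrun t i with hL
      set R := (t.drop (i + 1)).takeWhile pvWord with hR
      set S := (t.drop (i + 1)).dropWhile pvWord with hS
      have hLle : L.length ≤ i := le_trans (lrun_length_le t i) (Nat.min_le_left _ _)
      have hRwd : ∀ x ∈ R, pvWord x = true := fun x hx => List.mem_takeWhile_imp hx
      have hRS : t.drop (i + 1) = R ++ S := (List.takeWhile_append_dropWhile ..).symm
      -- the backward scan lands at i - |L|
      have hback : pvBack t ((i : Int) - 1) + 1 = ((i - L.length : Nat) : Int) := by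
        rw [pvBack_eq t i (by omega)]
        rw [← hL]
        omega
      -- the forward scan lands at i + 1 + |R|
      have hfwd : pvFwd t ((i : Int) + 1) = ((i + 1 + R.length : Nat) : Int) := by
        rw [show ((i : Int) + 1) = (((i + 1 : Nat)) : Int) by push_cast; ring]
        rw [pvFwd_eq t (i + 1), ← hR]
      -- structure of t after position i - |L|
      obtain ⟨P, hP, hPlen⟩ : ∃ P, t.take i = P ++ L ∧ P.length = i - L.length := by
        refine ⟨((t.take i).reverse.dropWhile pvWord).reverse, take_eq_skip_append_lrun t i, ?_⟩
        have h2 := congrArg List.length (take_eq_skip_append_lrun t i)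
        rw [← hL] at h2
        simp only [List.length_append, List.length_take, List.length_reverse] at h2 ⊢
        omega
      have ht : t = P ++ (L ++ '@' :: (R ++ S)) := by
        conv_lhs => rw [← List.take_append_drop i t]
        rw [hP, hdrop, hat, hRS, List.append_assoc]
      have hsplit : t.drop (i - L.length) = L ++ '@' :: (R ++ S) := by
        rw [← hPlen]
        conv_lhs => rw [ht]
        exact List.drop_left
      -- the slice is exactly L ++ '@' :: R
      have hslice : PySem.List.slice t (some ((i - L.length : Nat) : Int))
          (some ((i + 1 + R.length : Nat) : Int)) = L ++ '@' :: R := by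
        rw [PySem.List.slice_natCast]
        rw [hsplit]
        rw [show i + 1 + R.length - (i - L.length) = (L ++ '@' :: R).length by simp; omega]
        rw [show L ++ '@' :: (R ++ S) = (L ++ '@' :: R) ++ S by simp]
        exact List.take_left
      -- after the jump the left run is exactly R
      have hlrun' : lrun t (i + 1 + R.length) = R := by
        have htake : t.take (i + 1 + R.length) = (t.take i ++ ['@']) ++ R := by
          rw [List.take_add]
          rw [List.take_succ_eq_append_getElem hlt, hat]
          congr 1
          rw [hRS]
          exact List.take_left
        unfold lrun
        rw [htake, List.reverse_append, List.takeWhile_append_of_pos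
          (by intro x hx; exact hRwd x (by simpa using hx))]
        simp [pvWord_at]
      have hdrop' : t.drop (i + 1 + R.length) = S := by
        rw [← List.drop_drop, hRS]
        exact List.drop_left
      -- recursive call after the jump
      show pvMain t (emails ++ [PySem.List.slice t (some (pvBack t ((i : Int) - 1) + 1))
        (some (pvFwd t ((i : Int) + 1)))]) (pvFwd t ((i : Int) + 1)) = emails ++ pvSpec L (t.drop i)
      rw [hback, hfwd, hslice]
      rw [pvMain_eq t (i + 1 + R.length) (emails ++ [L ++ '@' :: R])]
      rw [hlrun', hdrop']
      rw [hdrop, hat]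
      conv_rhs => rw [pvSpec]
      rw [if_pos rfl, ← hR, ← hS]
      simp
    · rw [if_neg (by rw [hget]; simpa using hat)]
      rw [show ((i : Int) + 1) = (((i + 1 : Nat)) : Int) by push_cast; ring]
      rw [pvMain_eq t (i + 1) emails]
      rw [hdrop]
      conv_rhs => rw [pvSpec]
      rw [if_neg hat]
      by_cases hw : pvWord t[i] = true
      · rw [if_pos hw, lrun_succ_word t i hlt hw]
      · rw [if_neg hw, lrun_succ_not t i hlt hw]
  · rw [pvMain]
    rw [dif_neg (by intro hc; omega)]
    rw [List.drop_eq_nil_of_le (by omega)]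
    rw [pvSpec]
    simp
  termination_by t.length - i
  decreasing_by
  · omega
  · omega

theorem pvFold_eq (u : List Char) : ∀ (out : List (List Char)) (run : List Char),
    ((match u.foldl pvStep (out, run, none) with
      | (o, r, p) => pvFlush o r p) = out ++ pvSpec run u)
    ∧ ∀ l, (match u.foldl pvStep (out, run, some l) with
      | (o, r, p) => pvFlush o r p)
        = out ++ (l ++ '@' :: (run ++ u.takeWhile pvWord))
            :: pvSpec (run ++ u.takeWhile pvWord) (u.dropWhile pvWord) := by
  induction u with
  | nil =>
    intro out run
    constructor
    · simp [pvFlush, pvSpec]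
    · intro l; simp [pvFlush, pvSpec]
  | cons c rest ih =>
    intro out run
    by_cases hc : c = '@'
    · subst hc
      constructor
      · rw [List.foldl_cons]
        rw [show pvStep (out, run, none) '@' = (out, [], some run) by simp [pvStep, pvFlush]]
        rw [(ih out []).2 run]
        conv_rhs => rw [pvSpec]
        simp
      · intro l
        rw [List.foldl_cons]
        rw [show pvStep (out, run, some l) '@' = (out ++ [l ++ '@' :: run], [], some run) by
          simp [pvStep, pvFlush]]
        rw [(ih (out ++ [l ++ '@' :: run]) []).2 run]
        rw [List.takeWhile_cons_of_neg (by decide), List.dropWhile_cons_of_neg (by decide)]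
        conv_rhs => rw [pvSpec]
        simp
    · by_cases hw : pvWord c = true
      · have hstep : ∀ pd, pvStep (out, run, pd) c = (out, run ++ [c], pd) := by
          intro pd
          simp [pvStep, hc, hw]
        constructor
        · rw [List.foldl_cons, hstep]
          rw [(ih out (run ++ [c])).1]
          conv_rhs => rw [pvSpec]
          rw [if_neg hc, if_pos hw]
        · intro l
          rw [List.foldl_cons, hstep]
          rw [(ih out (run ++ [c])).2 l]
          rw [List.takeWhile_cons_of_pos hw, List.dropWhile_cons_of_pos hw]
          simp
      · constructor
        · rw [List.foldl_cons]
          rw [show pvStep (out, run, none) c = (out, [], none) by simp [pvStep, hc, hw, pvFlush]]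
          rw [(ih out []).1]
          conv_rhs => rw [pvSpec]
          rw [if_neg hc, if_neg hw]
        · intro l
          rw [List.foldl_cons]
          rw [show pvStep (out, run, some l) c = (out ++ [l ++ '@' :: run], [], none) by
            simp [pvStep, hc, hw, pvFlush]]
          rw [(ih (out ++ [l ++ '@' :: run]) []).1]
          rw [List.takeWhile_cons_of_neg hw, List.dropWhile_cons_of_neg hw]
          conv_rhs => rw [pvSpec]
          rw [if_neg hc, if_neg hw]
          simp

-- ===== VERDICT (by name: the statement is the Claim_ definition above) =====
theorem extract_emails_spec : Claim_equal_extract_emails := by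
  intro text _
  unfold Spec_extract_emails extract_emails extract_emails_alt
  have hA := pvMain_eq text.toList 0 []
  have hB := (pvFold_eq text.toList [] []).1
  simp only [Nat.cast_zero] at hA
  rcases hfold : text.toList.foldl pvStep ([], [], none) with ⟨o, r, pd⟩
  rw [hfold] at hB
  rw [hA]
  simpa [lrun_zero] using (congrArg (List.map String.ofList) hB).symm
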